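-- pv_equiv track=rewrite | github.com/berdanakyurek/codeforces-solutions | 131A.py | solve
-- ===== SOURCE A (Python) =====
-- def solve(s):
--     res = ""
--     for i in range(len(s)):
--         if(s[i].isupper()):
--             res += s[i].lower()
--         else:
--             if i > 0:
--                 return s
--             res += s[i].upper()
--     return res
-- ===== SOURCE B (Python) =====
-- def solve(s):
--     if all(c.isupper() for c in s[1:]):
--         return s.swapcase()
--     return s
-- ===== Notes on version B (the rewrite author's own statement) =====
-- stated objective: simpler
-- what changed: B replaces A's fused single-pass build-with-early-exit by a separate predicate check (all of s[1:] uppercase) followed by one library swapcase transform (or returning s unchanged).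
import Mathlib
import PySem

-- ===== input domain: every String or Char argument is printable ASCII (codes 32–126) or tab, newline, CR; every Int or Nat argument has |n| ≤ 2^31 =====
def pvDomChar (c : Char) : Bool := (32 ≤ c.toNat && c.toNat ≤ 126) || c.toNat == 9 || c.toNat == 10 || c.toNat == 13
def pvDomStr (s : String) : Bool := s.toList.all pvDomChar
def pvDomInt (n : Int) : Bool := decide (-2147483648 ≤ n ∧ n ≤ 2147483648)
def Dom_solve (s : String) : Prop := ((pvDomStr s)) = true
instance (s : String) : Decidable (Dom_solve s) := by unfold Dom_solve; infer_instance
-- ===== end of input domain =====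

-- B replaces A's fused single-pass build-with-early-exit by a predicate check over the tail
-- followed by one whole-string swapcase transform (objective: simpler).


-- ===== PORT A =====
-- the loop over range(len(s)) with its early 'return s', index i and accumulator res
def solveGo (s : String) (cs : List Char) (i : Nat) (res : List Char) : String :=
  match cs with
  | [] => String.ofList res
  | c :: rest =>
    if PySem.Chars.isupper c then
      solveGo s rest (i + 1) (res ++ [PySem.Chars.lowerChar c])
    else if i > 0 then s
    else solveGo s rest (i + 1) (res ++ [PySem.Chars.upperChar c])

def solve (s : String) : String := solveGo s s.toList 0 []

-- ===== PORT B =====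
-- Python's str.swapcase, per character (exact on the ASCII domain)
def swapChar (c : Char) : Char :=
  if PySem.Chars.isupper c then PySem.Chars.lowerChar c
  else if PySem.Chars.islower c then PySem.Chars.upperChar c
  else c

def solve_alt (s : String) : String :=
  if (s.toList.drop 1).all PySem.Chars.isupper then String.ofList (s.toList.map swapChar)
  else s

-- ===== PRECONDITION & SPEC =====
def Spec_solve (s : String) (out : String) : Prop := out = solve_alt s
instance (s : String) (out : String) : Decidable (Spec_solve s out) := by unfold Spec_solve; infer_instance

-- ===== CLAIM (what is proved, stated in full; the proofs are below) =====
def Claim_equal_solve : Prop := ∀ (s : String), Dom_solve s → Spec_solve s (solve s)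

-- ===== LEMMAS AND PROOFS =====
lemma swapChar_of_isupper {c : Char} (h : PySem.Chars.isupper c = true) :
    swapChar c = PySem.Chars.lowerChar c := by simp [swapChar, h]

lemma upperChar_eq_swapChar_of_not_isupper {c : Char} (h : PySem.Chars.isupper c = false) :
    PySem.Chars.upperChar c = swapChar c := by
  simp only [swapChar, h, if_false, Bool.false_eq_true]
  by_cases hl : PySem.Chars.islower c = true
  · simp [hl]
  · simp only [Bool.not_eq_true] at hl
    simp [hl, PySem.Chars.upperChar]

-- on the tail (i ≥ 1): the loop returns res ++ lowered cs if all upper, else s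
lemma solveGo_tail (s : String) (cs : List Char) (i : Nat) (res : List Char) :
    solveGo s cs (i + 1) res =
      if cs.all PySem.Chars.isupper then String.ofList (res ++ cs.map PySem.Chars.lowerChar)
      else s := by
  induction cs generalizing i res with
  | nil => simp [solveGo]
  | cons c rest ih =>
    by_cases hc : PySem.Chars.isupper c = true
    · simp only [solveGo, hc, if_true]
      rw [ih]
      by_cases hr : rest.all PySem.Chars.isupper = true <;> simp [hr, hc]
    · simp [solveGo, hc]

lemma map_swap_eq_map_lower {cs : List Char} (h : cs.all PySem.Chars.isupper = true) :
    cs.map swapChar = cs.map PySem.Chars.lowerChar := by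
  apply List.map_congr_left
  intro c hc
  exact swapChar_of_isupper (by simpa using List.all_eq_true.mp h c hc)

-- ===== VERDICT (by name: the statement is the Claim_ definition above) =====
theorem solve_spec : Claim_equal_solve := by
  intro s _
  unfold Spec_solve solve solve_alt
  cases hs : s.toList with
  | nil =>
    simp [solveGo]
  | cons c rest =>
    by_cases hc : PySem.Chars.isupper c = true
    · simp only [solveGo, hc, if_true, List.nil_append]
      rw [solveGo_tail]
      by_cases hrest : rest.all PySem.Chars.isupper = true
      · simp [hrest, swapChar_of_isupper hc, map_swap_eq_map_lower hrest]
      · simp [hrest]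
    · simp only [solveGo, hc, Bool.false_eq_true, if_false, gt_iff_lt, lt_irrefl,
        List.nil_append]
      rw [solveGo_tail]
      by_cases hrest : rest.all PySem.Chars.isupper = true
      · simp [hrest, upperChar_eq_swapChar_of_not_isupper
          (by simpa using hc), map_swap_eq_map_lower hrest]
      · simp [hrest]
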